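-- pv_equiv track=rewrite | github.com/ysu96/Algorithm-Python | PYTHON/programmers_test/2.py | check
-- ===== SOURCE A (Python) =====
-- def check(s):
--     left1 = 0
--     left2 = 0
--     left3 = 0
--     for i in range(len(s)):
--         if s[i] == '{':
--             left1 += 1
--         elif s[i] == '}':
--             left1 -= 1
--             if left1 < 0:
--                 return False
--         elif s[i] == '(':
--             left2 += 1
--         elif s[i] == ')':
--             left2 -= 1
--             if left2 < 0:
--                 return False
--         elif s[i] == '[':
--             left3 += 1
--         elif s[i] == ']':
--             left3 -= 1
--             if left3 < 0:
--                 return False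
--     if left1==0 and left2==0 and left3==0:
--         return True
--     else:
--         return False
-- ===== SOURCE B (Python) =====
-- def balanced(s, opench, closech):
--     k = 0
--     for ch in s:
--         if ch == opench:
--             k += 1
--         elif ch == closech:
--             k -= 1
--             if k < 0:
--                 return False
--     return k == 0
--
-- def check(s):
--     return balanced(s, '{', '}') and balanced(s, '(', ')') and balanced(s, '[', ']')
-- ===== Notes on version B (the rewrite author's own statement) =====
-- stated objective: simpler
-- what changed: Replaces A's single fused pass carrying three counters with a reusable helper balanced(s, open, close) that scans the string once per bracket type; check is the AND of three independent scans.
import Mathlib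
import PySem

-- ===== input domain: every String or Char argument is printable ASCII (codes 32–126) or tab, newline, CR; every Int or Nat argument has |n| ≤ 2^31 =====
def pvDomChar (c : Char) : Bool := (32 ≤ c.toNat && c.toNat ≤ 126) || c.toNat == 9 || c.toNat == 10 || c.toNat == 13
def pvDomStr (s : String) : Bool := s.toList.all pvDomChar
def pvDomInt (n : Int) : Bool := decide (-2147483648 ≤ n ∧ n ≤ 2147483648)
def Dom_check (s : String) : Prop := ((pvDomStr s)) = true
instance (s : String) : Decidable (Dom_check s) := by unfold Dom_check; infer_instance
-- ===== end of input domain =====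

-- B replaces A's single fused three-counter pass by three independent one-counter scans (one per bracket type), combined with AND; objective: simpler.

-- ===== PORT A =====
-- the loop of A: three counters updated in one pass, early False on a negative counter
def checkLoop : List Char → Int → Int → Int → Bool
  | [], left1, left2, left3 => left1 == 0 && left2 == 0 && left3 == 0
  | c :: cs, left1, left2, left3 =>
    if c = '{' then checkLoop cs (left1 + 1) left2 left3
    else if c = '}' then
      if left1 - 1 < 0 then false else checkLoop cs (left1 - 1) left2 left3
    else if c = '(' then checkLoop cs left1 (left2 + 1) left3
    else if c = ')' then
      if left2 - 1 < 0 then false else checkLoop cs left1 (left2 - 1) left3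
    else if c = '[' then checkLoop cs left1 left2 (left3 + 1)
    else if c = ']' then
      if left3 - 1 < 0 then false else checkLoop cs left1 left2 (left3 - 1)
    else checkLoop cs left1 left2 left3

def check (s : String) : Bool := checkLoop s.toList 0 0 0

-- ===== PORT B =====
-- helper balanced: one counter, one scan per bracket pair
def balancedLoop : List Char → Char → Char → Int → Bool
  | [], _, _, k => k == 0
  | ch :: cs, opench, closech, k =>
    if ch = opench then balancedLoop cs opench closech (k + 1)
    else if ch = closech then
      if k - 1 < 0 then false else balancedLoop cs opench closech (k - 1)
    else balancedLoop cs opench closech k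

def balanced (s : String) (opench closech : Char) : Bool :=
  balancedLoop s.toList opench closech 0

def check_alt (s : String) : Bool :=
  balanced s '{' '}' && balanced s '(' ')' && balanced s '[' ']'

-- ===== PRECONDITION & SPEC =====
def Spec_check (s : String) (out : Bool) : Prop := out = check_alt s
instance (s : String) (out : Bool) : Decidable (Spec_check s out) := by unfold Spec_check; infer_instance

-- ===== CLAIM (what is proved, stated in full; the proofs are below) =====
def Claim_equal_check : Prop := ∀ (s : String), Dom_check s → Spec_check s (check s)

-- ===== LEMMAS AND PROOFS =====
theorem checkLoop_eq (cs : List Char) : ∀ (l1 l2 l3 : Int),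
    checkLoop cs l1 l2 l3 =
      (balancedLoop cs '{' '}' l1 && balancedLoop cs '(' ')' l2 && balancedLoop cs '[' ']' l3) := by
  induction cs with
  | nil => intro l1 l2 l3; simp [checkLoop, balancedLoop]
  | cons c cs ih =>
    intro l1 l2 l3
    by_cases h1 : c = '{'
    · simp [checkLoop, balancedLoop, h1, ih]
    by_cases h2 : c = '}'
    · by_cases hn : l1 - 1 < 0 <;>
        simp [checkLoop, balancedLoop, h1, h2, hn, ih]
    by_cases h3 : c = '('
    · simp [checkLoop, balancedLoop, h2, h3, ih]
    by_cases h4 : c = ')'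
    · by_cases hn : l2 - 1 < 0 <;>
        simp [checkLoop, balancedLoop, h1, h2, h3, h4, hn, ih]
    by_cases h5 : c = '['
    · simp [checkLoop, balancedLoop, h4, h5, ih]
    by_cases h6 : c = ']'
    · by_cases hn : l3 - 1 < 0 <;>
        simp [checkLoop, balancedLoop, h1, h2, h3, h4, h5, h6, hn, ih]
    simp [checkLoop, balancedLoop, h1, h2, h3, h4, h5, h6, ih]

-- ===== VERDICT (by name: the statement is the Claim_ definition above) =====
theorem check_spec : Claim_equal_check := by
  intro s _
  unfold Spec_check check check_alt balanced
  exact checkLoop_eq s.toList 0 0 0
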